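-- pv_equiv track=rewrite | github.com/Rejean-McCormick/abstract-wiki-architect | tools/everything_matrix/app_scanner.py | _invert_iso_map
-- ===== SOURCE A (Python) =====
-- from typing import Any, Dict, Iterable, Mapping, Optional, Tuple
--
-- def _invert_iso_map(iso_map: Mapping[str, Dict[str, str]]) -> Dict[str, Dict[str, str]]:
--     """
--     Build a reverse index: wiki -> {"iso2": <best>, "iso3": <best>}
--     Deterministic by sorted iso_map keys; iso2 preferred where available.
--     """
--     by_wiki: Dict[str, Dict[str, str]] = {}
--     for k in sorted(iso_map.keys()):
--         wiki = iso_map[k].get("wiki")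
--         if not isinstance(wiki, str) or not wiki.strip():
--             continue
--         if wiki not in by_wiki:
--             by_wiki[wiki] = {}
--         if len(k) == 2 and "iso2" not in by_wiki[wiki]:
--             by_wiki[wiki]["iso2"] = k
--         if len(k) == 3 and "iso3" not in by_wiki[wiki]:
--             by_wiki[wiki]["iso3"] = k
--     return by_wiki
-- ===== SOURCE B (Python) =====
-- def _group_by_wiki(iso_map):
--     groups = {}
--     for k in sorted(iso_map.keys()):
--         wiki = iso_map[k].get("wiki")
--         if isinstance(wiki, str) and wiki.strip():
--             groups.setdefault(wiki, []).append(k)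
--     return groups
--
-- def _best_entry(ks):
--     entry = {}
--     for k in ks:
--         label = "iso2" if len(k) == 2 else "iso3" if len(k) == 3 else None
--         if label is not None and label not in entry:
--             entry[label] = k
--     return entry
--
-- def _invert_iso_map(iso_map):
--     return {w: _best_entry(ks) for w, ks in _group_by_wiki(iso_map).items()}
-- ===== Notes on version B (the rewrite author's own statement) =====
-- stated objective: alternative
-- what changed: Replaces A's single incremental set-if-absent loop over a nested dict by a collect-then-reduce decomposition: first group the sorted keys by their wiki, then reduce each group independently to its iso2/iso3 entry with a first-wins slot fill.
import Mathlib
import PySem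

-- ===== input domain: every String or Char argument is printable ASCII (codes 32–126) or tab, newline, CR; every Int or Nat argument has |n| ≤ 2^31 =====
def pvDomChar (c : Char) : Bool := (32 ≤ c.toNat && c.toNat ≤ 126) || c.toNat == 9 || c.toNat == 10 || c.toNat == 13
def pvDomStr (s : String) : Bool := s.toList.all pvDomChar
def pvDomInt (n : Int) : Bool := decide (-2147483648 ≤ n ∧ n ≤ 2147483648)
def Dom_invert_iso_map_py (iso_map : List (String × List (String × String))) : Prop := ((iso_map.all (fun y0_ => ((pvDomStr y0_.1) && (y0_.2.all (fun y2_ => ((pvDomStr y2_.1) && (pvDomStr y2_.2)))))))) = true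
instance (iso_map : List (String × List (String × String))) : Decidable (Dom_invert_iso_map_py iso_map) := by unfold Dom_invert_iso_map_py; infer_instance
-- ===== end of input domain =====

-- B replaces A's incremental set-if-absent nested-dict loop by a collect-then-reduce
-- decomposition (group sorted keys by wiki, then reduce each group to its entry);
-- objective: alternative (same cost, different structure).

-- ===== PORT A =====
-- the input dict arrives as an association list; PySem.Dict.ofList is Python's dict() reading of it
def invert_iso_map_py (iso_map : List (String × List (String × String))) : List (String × List (String × String)) :=
  let d := PySem.Dict.ofList iso_map
  let by_wiki := (PySem.List.sorted d.keys (fun k => k) false).foldl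
    (fun bw k =>
      match (PySem.Dict.ofList (d.getD k [])).get? "wiki" with
      | none => bw                                   -- wiki is None: not a str
      | some wiki =>
        if PySem.Str.strip wiki = "" then bw         -- not wiki.strip()
        else
          let bw1 := if bw.contains wiki then bw else bw.insert wiki PySem.Dict.empty
          let bw2 := if PySem.Str.len k = 2 ∧ (bw1.getD wiki PySem.Dict.empty).contains "iso2" = false
                     then bw1.insert wiki ((bw1.getD wiki PySem.Dict.empty).insert "iso2" k) else bw1
          if PySem.Str.len k = 3 ∧ (bw2.getD wiki PySem.Dict.empty).contains "iso3" = false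
          then bw2.insert wiki ((bw2.getD wiki PySem.Dict.empty).insert "iso3" k) else bw2)
    PySem.Dict.empty
  by_wiki.items.map (fun p => (p.1, p.2.items))

-- ===== PORT B =====
-- _group_by_wiki: group the sorted keys by their (valid) wiki
def pvGroupByWiki (iso_map : List (String × List (String × String))) : PySem.Dict String (List String) :=
  let d := PySem.Dict.ofList iso_map
  (PySem.List.sorted d.keys (fun k => k) false).foldl
    (fun g k =>
      match (PySem.Dict.ofList (d.getD k [])).get? "wiki" with
      | none => g
      | some wiki =>
        if PySem.Str.strip wiki = "" then g
        else g.modify wiki [] (fun ks => ks ++ [k]))   -- groups.setdefault(wiki, []).append(k)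
    PySem.Dict.empty

-- _best_entry: first-wins slot fill over the group's keys
def pvBestEntry (ks : List String) : PySem.Dict String String :=
  ks.foldl
    (fun entry k =>
      let label : Option String :=
        if PySem.Str.len k = 2 then some "iso2"
        else if PySem.Str.len k = 3 then some "iso3" else none
      match label with
      | none => entry
      | some l => if entry.contains l = false then entry.insert l k else entry)
    PySem.Dict.empty

def invert_iso_map_py_alt (iso_map : List (String × List (String × String))) : List (String × List (String × String)) :=
  -- {w: _best_entry(ks) for w, ks in _group_by_wiki(iso_map).items()}: the grouping dict's
  -- keys are distinct, so the comprehension emits one entry per item in items order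
  (pvGroupByWiki iso_map).items.map (fun p => (p.1, (pvBestEntry p.2).items))

-- ===== PRECONDITION & SPEC =====
def Spec_invert_iso_map_py (iso_map : List (String × List (String × String))) (out : List (String × List (String × String))) : Prop := out = invert_iso_map_py_alt iso_map
instance (iso_map : List (String × List (String × String))) (out : List (String × List (String × String))) : Decidable (Spec_invert_iso_map_py iso_map out) := by unfold Spec_invert_iso_map_py; infer_instance

-- ===== CLAIM (what is proved, stated in full; the proofs are below) =====
def Claim_equal_invert_iso_map_py : Prop := ∀ (iso_map : List (String × List (String × String))), Dom_invert_iso_map_py iso_map → Spec_invert_iso_map_py iso_map (invert_iso_map_py iso_map)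

-- ===== LEMMAS AND PROOFS =====

-- the net effect of A's two set-if-absent statements on one wiki's inner dict
def pvStep (e : PySem.Dict String String) (k : String) : PySem.Dict String String :=
  let e1 := if PySem.Str.len k = 2 ∧ e.contains "iso2" = false then e.insert "iso2" k else e
  if PySem.Str.len k = 3 ∧ e1.contains "iso3" = false then e1.insert "iso3" k else e1

-- A's inner dict for a wiki whose keys (in sorted order) are ks
def pvEntryA (ks : List String) : PySem.Dict String String := ks.foldl pvStep PySem.Dict.empty

def pvMapF (p : String × List String) : String × PySem.Dict String String := (p.1, pvEntryA p.2)

-- A's combined set-if-absent step equals B's labelled first-wins step (len k is never both 2 and 3)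
lemma pv_step_eq (e : PySem.Dict String String) (k : String) :
    pvStep e k =
      (match (if PySem.Str.len k = 2 then some "iso2"
              else if PySem.Str.len k = 3 then some "iso3" else none : Option String) with
       | none => e
       | some l => if e.contains l = false then e.insert l k else e) := by
  unfold pvStep
  simp only [PySem.Str.len_eq]
  by_cases h2 : ((k.length : Int) = 2) <;> by_cases h3 : ((k.length : Int) = 3)
  · exfalso; omega
  · by_cases hc : e.contains "iso2" = false <;> simp [h2, hc]
  · by_cases hc : e.contains "iso3" = false <;> simp [h3, hc]
  · simp [h2, h3]

lemma pv_fold_eq : ∀ (ks : List String) (e : PySem.Dict String String),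
    ks.foldl pvStep e =
    ks.foldl
      (fun entry k =>
        let label : Option String :=
          if PySem.Str.len k = 2 then some "iso2"
          else if PySem.Str.len k = 3 then some "iso3" else none
        match label with
        | none => entry
        | some l => if entry.contains l = false then entry.insert l k else entry) e := by
  intro ks
  induction ks with
  | nil => intro e; rfl
  | cons k ks ih =>
    intro e
    simp only [List.foldl]
    rw [pv_step_eq]
    exact ih _

lemma pv_entryA_eq_best (ks : List String) : pvEntryA ks = pvBestEntry ks :=
  pv_fold_eq ks PySem.Dict.empty

lemma pv_get?_map_items (l : List (String × List String)) (w : String) :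
    (PySem.Dict.mk (l.map pvMapF)).get? w = ((PySem.Dict.mk l).get? w).map pvEntryA := by
  induction l with
  | nil => rfl
  | cons p l ih =>
    cases p with
    | mk k v =>
      simp only [List.map, pvMapF, PySem.Dict.get?_mk_cons]
      by_cases h : (k == w) = true
      · rw [h]; simp
      · rw [Bool.not_eq_true] at h; rw [h]; simpa using ih

lemma pv_insert_getD_self (bw : PySem.Dict String (PySem.Dict String String)) (w : String)
    (hnd : bw.keys.Nodup) (hc : bw.contains w = true) :
    bw.insert w (bw.getD w PySem.Dict.empty) = bw := by
  apply PySem.Dict.ext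
  rw [PySem.Dict.items_insert_of_contains _ _ hc]
  conv_rhs => rw [← List.map_id bw.items]
  apply List.map_congr_left
  intro p hp
  by_cases hpw : (p.1 == w) = true
  · have hp1 : p.1 = w := by simpa using hpw
    have hmem : (w, p.2) ∈ bw.items := by rw [← hp1]; exact hp
    have hg := PySem.Dict.getD_of_mem_items bw hmem hnd PySem.Dict.empty
    rw [hpw]; simp only [if_true, hg, id]
    rw [← hp1]
  · rw [Bool.not_eq_true] at hpw; rw [hpw]; simp

lemma pv_abody (bw : PySem.Dict String (PySem.Dict String String)) (w k : String)
    (hnd : bw.keys.Nodup) :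
    (let bw1 := if bw.contains w then bw else bw.insert w PySem.Dict.empty
     let bw2 := if PySem.Str.len k = 2 ∧ (bw1.getD w PySem.Dict.empty).contains "iso2" = false
                then bw1.insert w ((bw1.getD w PySem.Dict.empty).insert "iso2" k) else bw1
     if PySem.Str.len k = 3 ∧ (bw2.getD w PySem.Dict.empty).contains "iso3" = false
     then bw2.insert w ((bw2.getD w PySem.Dict.empty).insert "iso3" k) else bw2) =
    bw.insert w (pvStep (bw.getD w PySem.Dict.empty) k) := by
  by_cases hc : bw.contains w = true
  · simp only [hc, if_true, pvStep]
    by_cases c2 : PySem.Str.len k = 2 ∧ (bw.getD w PySem.Dict.empty).contains "iso2" = false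
    · rw [if_pos c2, if_pos c2, PySem.Dict.getD_insert_self]
      by_cases c3 : PySem.Str.len k = 3 ∧ ((bw.getD w PySem.Dict.empty).insert "iso2" k).contains "iso3" = false
      · rw [if_pos c3, if_pos c3, PySem.Dict.insert_insert_self]
      · rw [if_neg c3, if_neg c3]
    · rw [if_neg c2, if_neg c2]
      by_cases c3 : PySem.Str.len k = 3 ∧ (bw.getD w PySem.Dict.empty).contains "iso3" = false
      · rw [if_pos c3, if_pos c3]
      · rw [if_neg c3, if_neg c3, pv_insert_getD_self bw w hnd hc]
  · rw [Bool.not_eq_true] at hc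
    have hgd : bw.getD w PySem.Dict.empty = PySem.Dict.empty :=
      PySem.Dict.getD_of_not_contains bw PySem.Dict.empty hc
    simp only [hc, Bool.false_eq_true, if_false, pvStep, hgd, PySem.Dict.getD_insert_self]
    by_cases c2 : PySem.Str.len k = 2 ∧ (PySem.Dict.empty : PySem.Dict String String).contains "iso2" = false
    · rw [if_pos c2, if_pos c2]
      simp only [PySem.Dict.getD_insert_self, PySem.Dict.insert_insert_self]
      by_cases c3 : PySem.Str.len k = 3 ∧ ((PySem.Dict.empty : PySem.Dict String String).insert "iso2" k).contains "iso3" = false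
      · rw [if_pos c3, if_pos c3]
      · rw [if_neg c3, if_neg c3]
    · rw [if_neg c2, if_neg c2]
      simp only [PySem.Dict.getD_insert_self, PySem.Dict.insert_insert_self]
      by_cases c3 : PySem.Str.len k = 3 ∧ (PySem.Dict.empty : PySem.Dict String String).contains "iso3" = false
      · rw [if_pos c3, if_pos c3]
      · rw [if_neg c3, if_neg c3]

lemma pv_items_insert_map (g : PySem.Dict String (List String)) (w : String) (L : List String) :
    ((PySem.Dict.mk (g.items.map pvMapF)).insert w (pvEntryA L)).items =
    ((g.insert w L).items).map pvMapF := by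
  have hcont : (PySem.Dict.mk (g.items.map pvMapF)).contains w = g.contains w := by
    rw [PySem.Dict.contains_eq_decide_mem_keys, PySem.Dict.contains_eq_decide_mem_keys]
    simp [PySem.Dict.keys, pvMapF]
  by_cases hc : g.contains w = true
  · rw [PySem.Dict.items_insert_of_contains _ _ (by rw [hcont]; exact hc),
        PySem.Dict.items_insert_of_contains _ _ hc]
    simp only [List.map_map]
    apply List.map_congr_left
    intro p _
    by_cases hpw : (p.1 == w) = true
    · simp [Function.comp, pvMapF, hpw]
    · rw [Bool.not_eq_true] at hpw; simp [Function.comp, pvMapF, hpw]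
  · rw [Bool.not_eq_true] at hc
    rw [PySem.Dict.items_insert_of_not_contains _ _ (by rw [hcont]; exact hc),
        PySem.Dict.items_insert_of_not_contains _ _ hc]
    simp [pvMapF]

lemma pv_keys_map (g : PySem.Dict String (List String)) :
    (PySem.Dict.mk (g.items.map pvMapF)).keys = g.keys := by
  simp [PySem.Dict.keys, pvMapF]

lemma pv_getD_map (g : PySem.Dict String (List String)) (w : String) :
    (PySem.Dict.mk (g.items.map pvMapF)).getD w PySem.Dict.empty = pvEntryA (g.getD w []) := by
  rw [PySem.Dict.getD_eq_get?_getD, PySem.Dict.getD_eq_get?_getD, pv_get?_map_items]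
  cases g.get? w with
  | none => rfl
  | some L => rfl

lemma pv_loop_inv (w? : String → Option String) :
    ∀ (ks : List String) (bw : PySem.Dict String (PySem.Dict String String))
      (g : PySem.Dict String (List String)),
      g.keys.Nodup → bw.items = g.items.map pvMapF →
      (ks.foldl (fun bw k =>
        match w? k with
        | none => bw
        | some wiki =>
          if PySem.Str.strip wiki = "" then bw
          else
            let bw1 := if bw.contains wiki then bw else bw.insert wiki PySem.Dict.empty
            let bw2 := if PySem.Str.len k = 2 ∧ (bw1.getD wiki PySem.Dict.empty).contains "iso2" = false
                       then bw1.insert wiki ((bw1.getD wiki PySem.Dict.empty).insert "iso2" k) else bw1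
            if PySem.Str.len k = 3 ∧ (bw2.getD wiki PySem.Dict.empty).contains "iso3" = false
            then bw2.insert wiki ((bw2.getD wiki PySem.Dict.empty).insert "iso3" k) else bw2) bw).items =
      (ks.foldl (fun g k =>
        match w? k with
        | none => g
        | some wiki =>
          if PySem.Str.strip wiki = "" then g
          else g.modify wiki [] (fun ks => ks ++ [k])) g).items.map pvMapF := by
  intro ks
  induction ks with
  | nil => intro bw g _ h; exact h
  | cons k ks ih =>
    intro bw g hnd hitems
    have hbw : bw = PySem.Dict.mk (g.items.map pvMapF) := PySem.Dict.ext hitems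
    subst hbw
    simp only [List.foldl]
    cases hwk : w? k with
    | none => exact ih _ g hnd rfl
    | some w =>
      simp only []
      by_cases hstrip : PySem.Str.strip w = ""
      · rw [if_pos hstrip, if_pos hstrip]
        exact ih _ g hnd rfl
      · rw [if_neg hstrip, if_neg hstrip]
        have hndm : (PySem.Dict.mk (g.items.map pvMapF)).keys.Nodup := by
          rw [pv_keys_map]; exact hnd
        rw [pv_abody _ w k hndm, pv_getD_map]
        have hstepE : pvStep (pvEntryA (g.getD w [])) k = pvEntryA (g.getD w [] ++ [k]) := by
          rw [pvEntryA, pvEntryA, List.foldl_concat]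
        rw [hstepE]
        have hmod : g.modify w [] (fun ks => ks ++ [k]) = g.insert w (g.getD w [] ++ [k]) := rfl
        rw [hmod]
        exact ih _ (g.insert w (g.getD w [] ++ [k]))
          (PySem.Dict.nodup_keys_insert g w _ hnd)
          (pv_items_insert_map g w _)

-- ===== VERDICT (by name: the statement is the Claim_ definition above) =====
theorem invert_iso_map_py_spec : Claim_equal_invert_iso_map_py := by
  intro iso_map _
  unfold Spec_invert_iso_map_py invert_iso_map_py invert_iso_map_py_alt pvGroupByWiki
  have h := pv_loop_inv
    (fun k => (PySem.Dict.ofList ((PySem.Dict.ofList iso_map).getD k [])).get? "wiki")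
    (PySem.List.sorted (PySem.Dict.ofList iso_map).keys (fun k => k) false)
    PySem.Dict.empty PySem.Dict.empty (by simp [PySem.Dict.keys, PySem.Dict.empty]) (by rfl)
  simp only []
  rw [h]
  simp [List.map_map, Function.comp, pvMapF, pv_entryA_eq_best]
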